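-- pv_equiv track=rewrite | github.com/azur1s/pscp2025 | 051-100/089_kabata.py | check
-- ===== SOURCE A (Python) =====
-- def check(s):
--     """a"""
--     buf = ""
--     i = 0
--     while True:
--         if i >= len(s):
--             break
--         buf += s[i]
--         i += 1
--
--         if buf == "ba" and len(s) - i >= 3 and s[i:i+3] == "kka":
--             buf = ""
--             i += 3
--         elif buf == "ba" and len(s) - i >= 2 and s[i:i+2] == "ka":
--             return False
--
--         if buf in ("ka", "ba", "ta"):
--             buf = ""
--     return buf == ""
-- ===== SOURCE B (Python) =====
-- def check(s):
--     i = 0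
--     n = len(s)
--     while i < n:
--         if s[i:i+5] == "bakka":
--             i += 5
--         elif s[i:i+2] == "ba":
--             if s[i+2:i+4] == "ka":
--                 return False
--             i += 2
--         elif s[i:i+2] in ("ka", "ta"):
--             i += 2
--         else:
--             return False
--     return True
-- ===== Notes on version B (the rewrite author's own statement) =====
-- stated objective: simpler
-- what changed: Replaced A's char-by-char buffer accumulator (buf grows one character per iteration, tested against tokens and combined with lookahead slices) by an index-jumping token scanner that compares whole slices ('bakka', 'ba', 'ka', 'ta') and advances by the token length.
import Mathlib
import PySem

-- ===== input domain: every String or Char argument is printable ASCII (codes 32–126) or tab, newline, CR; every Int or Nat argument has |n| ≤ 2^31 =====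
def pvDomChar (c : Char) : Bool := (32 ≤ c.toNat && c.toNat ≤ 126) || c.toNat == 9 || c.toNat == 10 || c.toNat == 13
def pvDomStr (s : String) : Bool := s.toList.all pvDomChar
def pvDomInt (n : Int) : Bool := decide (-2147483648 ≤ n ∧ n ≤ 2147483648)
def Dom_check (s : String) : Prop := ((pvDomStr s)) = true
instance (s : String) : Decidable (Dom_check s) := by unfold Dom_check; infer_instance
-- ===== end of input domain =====

-- B replaces A's char-by-char buffer accumulator with a token scanner that matches whole
-- slices ("bakka"/"ba"/"ka"/"ta") and jumps by token length (objective: simpler).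

-- ===== PORT A =====
-- A's while loop: buf accumulates one char per step (buf += s[i]; i += 1); the slice tests
-- s[i:i+3]=="kka" / s[i:i+2]=="ka" (with their length guards) are rest.take 3 / rest.take 2
-- (a short slice makes the equality false, exactly like the length guard).
def pvTokens : List (List Char) := [['k', 'a'], ['b', 'a'], ['t', 'a']]

def checkLoop (buf : List Char) (l : List Char) : Bool :=
  match l with
  | [] => buf = []                -- i >= len(s): break; return buf == ""
  | c :: rest =>
    let buf' := buf ++ [c]
    if buf' = ['b', 'a'] ∧ rest.take 3 = ['k', 'k', 'a'] then
      -- buf = ""; i += 3 ; ("" is never in pvTokens, so the membership test is a no-op here)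
      checkLoop [] (rest.drop 3)
    else if buf' = ['b', 'a'] ∧ rest.take 2 = ['k', 'a'] then
      false                       -- return False
    else if buf' ∈ pvTokens then
      checkLoop [] rest           -- buf = ""
    else
      checkLoop buf' rest
termination_by l.length
decreasing_by all_goals simp

def check (s : String) : Bool := checkLoop [] s.toList

-- ===== PORT B =====
-- Source B's scanner: slice comparisons against whole tokens, index jumps by token length.
def scan (l : List Char) : Bool :=
  match l with
  | [] => true                    -- i = n: return True
  | c :: r =>
    if (c :: r).take 5 = ['b', 'a', 'k', 'k', 'a'] then
      scan (r.drop 4)             -- i += 5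
    else if (c :: r).take 2 = ['b', 'a'] then
      if (r.drop 1).take 2 = ['k', 'a'] then false   -- s[i+2:i+4] == "ka": return False
      else scan (r.drop 1)        -- i += 2
    else if (c :: r).take 2 = ['k', 'a'] ∨ (c :: r).take 2 = ['t', 'a'] then
      scan (r.drop 1)             -- i += 2
    else
      false                       -- return False
termination_by l.length
decreasing_by all_goals simp

def check_alt (s : String) : Bool := scan s.toList

-- ===== PRECONDITION & SPEC =====
def Spec_check (s : String) (out : Bool) : Prop := out = check_alt s
instance (s : String) (out : Bool) : Decidable (Spec_check s out) := by unfold Spec_check; infer_instance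

-- ===== CLAIM (what is proved, stated in full; the proofs are below) =====
def Claim_equal_check : Prop := ∀ (s : String), Dom_check s → Spec_check s (check s)

-- ===== LEMMAS AND PROOFS =====

-- Once buf has length ≥ 3 it can never again equal a length-2 token, so A's loop just
-- keeps appending and ends with buf ≠ "".
theorem checkLoop_long (l : List Char) : ∀ (buf : List Char), 3 ≤ buf.length →
    checkLoop buf l = false := by
  induction l with
  | nil =>
    intro buf h
    simp [checkLoop]
    intro hb; subst hb; simp at h
  | cons c rest ih =>
    intro buf h
    rw [checkLoop]
    have h2 : buf ++ [c] ≠ (['b', 'a'] : List Char) := by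
      intro he; have := congrArg List.length he; simp at this; omega
    have h3 : buf ++ [c] ∉ pvTokens := by
      intro he
      simp [pvTokens] at he
      rcases he with he | he | he <;>
        (have := congrArg List.length he; simp at this; omega)
    simp only [h2, false_and, if_false, h3, if_false]
    exact ih _ (by simp; omega)

-- One step later: a length-2 buf that is neither "ba" nor a token also gets stuck.
theorem checkLoop_stuck (l : List Char) (buf : List Char) (h2 : 2 ≤ buf.length)
    (hba : buf ≠ ['b', 'a']) (htok : buf ∉ pvTokens) : checkLoop buf l = false := by
  cases l with
  | nil =>
    simp [checkLoop]
    intro hb; subst hb; simp at h2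
  | cons c rest =>
    rw [checkLoop]
    have hlen : (buf ++ [c]).length = buf.length + 1 := by simp
    have hba' : buf ++ [c] ≠ (['b', 'a'] : List Char) := by
      intro he; have := congrArg List.length he; simp at this; omega
    have htok' : buf ++ [c] ∉ pvTokens := by
      intro he
      simp [pvTokens] at he
      rcases he with he | he | he <;>
        (have := congrArg List.length he; simp at this; omega)
    simp only [hba', false_and, if_false, htok', if_false]
    exact checkLoop_long rest (buf ++ [c]) (by simp; omega)

theorem main_equiv : ∀ (n : ℕ) (l : List Char), l.length ≤ n →
    checkLoop [] l = scan l := by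
  intro n
  induction n with
  | zero =>
    intro l hl
    have : l = [] := List.eq_nil_of_length_eq_zero (by omega)
    subst this; simp [checkLoop, scan]
  | succ n ih =>
    intro l hl
    match l with
    | [] => simp [checkLoop, scan]
    | [c] =>
      -- one leftover char: A ends with buf = [c] ≠ []; B's scanner matches nothing
      rw [checkLoop]
      have h2 : ([c] : List Char) ≠ ['b', 'a'] := by simp
      have h3 : ([c] : List Char) ∉ pvTokens := by simp [pvTokens]
      simp only [List.nil_append, h2, false_and, if_false, h3, if_false]
      rw [checkLoop, scan]
      simp
    | c :: c2 :: rest2 =>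
      rw [checkLoop]
      have h2 : ([c] : List Char) ≠ ['b', 'a'] := by simp
      have h3 : ([c] : List Char) ∉ pvTokens := by simp [pvTokens]
      simp only [List.nil_append, h2, false_and, if_false, h3, if_false]
      rw [checkLoop]
      simp only [List.cons_append, List.nil_append]
      rw [scan]
      have htake5 : (c :: c2 :: rest2).take 5 = c :: c2 :: rest2.take 3 := by
        simp [List.take]
      have htake2 : (c :: c2 :: rest2).take 2 = [c, c2] := by simp [List.take]
      have hdrop : ((c2 :: rest2).drop 1) = rest2 := by simp
      have hd4 : ((c2 :: rest2).drop 4) = rest2.drop 3 := rfl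
      by_cases hba : [c, c2] = (['b', 'a'] : List Char)
      · by_cases hkka : rest2.take 3 = (['k', 'k', 'a'] : List Char)
        · -- "bakka": both consume five characters
          have h5 : (c :: c2 :: rest2).take 5 = ['b', 'a', 'k', 'k', 'a'] := by
            rw [htake5, hkka]
            injection hba with e1 h; injection h with e2 _
            rw [e1, e2]
          rw [if_pos ⟨hba, hkka⟩, if_pos h5, hd4]
          exact ih (rest2.drop 3) (by simp at hl ⊢; omega)
        · have hnot1 : ¬([c, c2] = (['b', 'a'] : List Char) ∧
              rest2.take 3 = ['k', 'k', 'a']) := fun h => hkka h.2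
          have h5 : (c :: c2 :: rest2).take 5 ≠ ['b', 'a', 'k', 'k', 'a'] := by
            rw [htake5]; intro he
            apply hkka; injection he with _ h; injection h
          by_cases hka : rest2.take 2 = (['k', 'a'] : List Char)
          · -- "ba" followed by "ka": both return False
            rw [if_neg hnot1, if_pos ⟨hba, hka⟩, if_neg h5, htake2, if_pos hba, hdrop,
              if_pos hka]
          · -- lone "ba" token: both consume two characters and continue
            have htok : [c, c2] ∈ pvTokens := by rw [hba]; simp [pvTokens]
            rw [if_neg hnot1, if_neg (fun h => hka h.2), if_pos htok, if_neg h5, htake2,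
              if_pos hba, hdrop, if_neg hka]
            exact ih rest2 (by simp at hl ⊢; omega)
      · have hnot1 : ¬([c, c2] = (['b', 'a'] : List Char) ∧
            rest2.take 3 = ['k', 'k', 'a']) := fun h => hba h.1
        have hnot2 : ¬([c, c2] = (['b', 'a'] : List Char) ∧
            rest2.take 2 = ['k', 'a']) := fun h => hba h.1
        have h5 : (c :: c2 :: rest2).take 5 ≠ ['b', 'a', 'k', 'k', 'a'] := by
          rw [htake5]; intro he
          apply hba
          injection he with e1 h; injection h with e2 _
          rw [e1, e2]
        by_cases htok : [c, c2] ∈ pvTokens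
        · -- "ka" or "ta": both consume two characters and continue
          have hkt : [c, c2] = (['k', 'a'] : List Char) ∨ [c, c2] = (['t', 'a'] : List Char) := by
            simp [pvTokens] at htok
            rcases htok with ⟨e1, e2⟩ | ⟨e1, e2⟩ | ⟨e1, e2⟩ <;> subst e1 <;> subst e2 <;>
              simp_all
          rw [if_neg hnot1, if_neg hnot2, if_pos htok, if_neg h5, htake2, if_neg hba,
            if_pos hkt, hdrop]
          exact ih rest2 (by simp at hl ⊢; omega)
        · -- no token matches: A's buf can never empty again, B rejects immediately
          have hkt : ¬([c, c2] = (['k', 'a'] : List Char) ∨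
              [c, c2] = (['t', 'a'] : List Char)) := by
            rintro (h | h) <;> exact htok (by rw [h]; simp [pvTokens])
          rw [if_neg hnot1, if_neg hnot2, if_neg htok, if_neg h5, htake2, if_neg hba,
            if_neg hkt]
          exact checkLoop_stuck rest2 [c, c2] (by simp) hba htok

-- ===== VERDICT (by name: the statement is the Claim_ definition above) =====
theorem check_spec : Claim_equal_check := by
  intro s _
  unfold Spec_check check check_alt
  exact main_equiv s.toList.length s.toList le_rfl
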